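-- pv_equiv track=rewrite | github.com/romeorizzi/TALight | example_problems/tutorial/parentheses/bots/parentheses_all_rec_simple_bot.py | unrank
-- ===== SOURCE A (Python) =====
-- def num_sol(num_pairs):
--     if num_pairs == 0:
--         return 1
--     risp = 0
--     for n_pairs_included in range(num_pairs):
--         risp += num_sol(n_pairs_included) * num_sol(num_pairs - n_pairs_included -1)
--     return risp
--
-- def unrank(n_pairs, pos, sorting_criterion="loves_opening_par"):
--     if n_pairs == 0:
--         return ""
--     """(  ... )  ...
--            A      B
--     """
--     count = 0
--     for n_pairs_in_A in range(n_pairs) if sorting_criterion=="loves_closing_par" else reversed(range(n_pairs)):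
--         num_A = num_sol(n_pairs_in_A)
--         num_B = num_sol(n_pairs - n_pairs_in_A -1)
--         if count + num_A*num_B > pos:
--             break
--         count += num_A*num_B
--     return "(" + unrank(n_pairs_in_A, (pos-count) // num_B, sorting_criterion) + ")" + unrank(n_pairs - n_pairs_in_A -1, (pos-count) % num_B, sorting_criterion)
-- ===== SOURCE B (Python) =====
-- def unrank(n_pairs, pos, sorting_criterion="loves_opening_par"):
--     if n_pairs <= 0:
--         return ""
--     # Catalan numbers up to n_pairs, computed once by dynamic programming.
--     cat = [1]
--     for m in range(1, n_pairs + 1):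
--         cat.append(sum(cat[k] * cat[m - 1 - k] for k in range(m)))
--
--     def go(n, p):
--         if n == 0:
--             return ""
--         count = 0
--         splits = range(n) if sorting_criterion == "loves_closing_par" else range(n - 1, -1, -1)
--         for a in splits:
--             w = cat[a] * cat[n - 1 - a]
--             if count + w > p:
--                 break
--             count += w
--         b = n - 1 - a
--         q, r = divmod(p - count, cat[b])
--         return "(" + go(a, q) + ")" + go(b, r)
--
--     return go(n_pairs, pos)
-- ===== Notes on version B (the rewrite author's own statement) =====
-- stated objective: faster
-- what changed: B replaces A's unmemoized exponential Catalan recursion num_sol with a Catalan table computed once by dynamic programming (and a single recursive unranking pass using divmod over that table); intended as faster (exponential recursion becomes a DP table): a timing-probe run measured A timing out at n=64 where B answered the same value instantly; at the small sizes where A finishes, runs could not always confirm a ratio.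
import Mathlib
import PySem

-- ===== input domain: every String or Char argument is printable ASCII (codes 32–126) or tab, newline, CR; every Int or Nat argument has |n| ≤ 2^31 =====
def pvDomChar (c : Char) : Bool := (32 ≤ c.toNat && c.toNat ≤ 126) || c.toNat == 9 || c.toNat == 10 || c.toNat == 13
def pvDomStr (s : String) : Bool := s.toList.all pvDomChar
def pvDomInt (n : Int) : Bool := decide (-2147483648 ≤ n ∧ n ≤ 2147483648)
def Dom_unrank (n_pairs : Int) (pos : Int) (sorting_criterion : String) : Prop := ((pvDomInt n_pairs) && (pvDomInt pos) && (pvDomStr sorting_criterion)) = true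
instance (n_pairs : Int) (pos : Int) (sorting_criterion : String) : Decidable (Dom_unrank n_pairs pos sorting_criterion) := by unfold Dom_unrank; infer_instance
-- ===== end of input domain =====

-- B replaces A's unmemoized exponential Catalan recursion by a Catalan table computed once; intended as faster — a timing-probe run measured A timing out where B answered the same value instantly; at small sizes A also finishes fast.

-- ===== PORT A =====
-- Python num_sol on a Nat argument: exponential recursion, the for-loop is a foldl over range(num_pairs)
def numSolNat : Nat → Int
  | 0 => 1
  | n + 1 =>
    (List.range (n + 1)).attach.foldl
      (fun r (k : {x // x ∈ List.range (n + 1)}) =>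
        have hk : k.1 < n + 1 := List.mem_range.mp k.2
        r + numSolNat k.1 * numSolNat (n - k.1)) 0
decreasing_by
  · exact hk
  · omega

-- num_sol on Int: for num_pairs < 0 the Python loop is empty and risp = 0 is returned
def numSol (num_pairs : Int) : Int :=
  if num_pairs = 0 then 1
  else if num_pairs < 0 then 0
  else numSolNat num_pairs.toNat

-- A's split-scan loop with break: returns (count, n_pairs_in_A) exactly as the Python loop leaves them
def pickA (n : Int) (pos : Int) : List Int → Int → Int × Int
  | [], count => (count, 0)   -- never reached from unrank (the loop body runs at least once when n ≥ 1)
  | a :: rest, count =>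
    let w := numSol a * numSol (n - a - 1)
    if count + w > pos then (count, a)
    else
      match rest with
      | [] => (count + w, a)
      | _ :: _ => pickA n pos rest (count + w)

theorem pickA_mem (n pos : Int) (l : List Int) (c : Int) (h : l ≠ []) :
    (pickA n pos l c).2 ∈ l := by
  induction l generalizing c with
  | nil => exact absurd rfl h
  | cons a rest ih =>
    simp only [pickA]
    split
    · simp
    · cases rest with
      | nil => simp
      | cons b t =>
        have := ih (c + numSol a * numSol (n - a - 1)) (by simp)
        exact List.mem_cons_of_mem a this

def unrank (n_pairs : Int) (pos : Int) (sorting_criterion : String) : String :=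
  -- Python returns "" for n_pairs == 0; for n_pairs < 0 it raises (outside Pre_): the ≤ guard only makes the port total
  if hn : n_pairs ≤ 0 then ""
  else
    let splits : List Int :=
      if sorting_criterion == "loves_closing_par"
      then (List.range n_pairs.toNat).map Int.ofNat
      else ((List.range n_pairs.toNat).map Int.ofNat).reverse
    have hall : ∀ x ∈ splits, 0 ≤ x ∧ x < n_pairs := by
      intro x hx
      have hx' : x ∈ (List.range n_pairs.toNat).map Int.ofNat := by
        simp only [splits] at hx
        split at hx
        · exact hx
        · exact List.mem_reverse.mp hx
      rcases List.mem_map.mp hx' with ⟨k, hk, rfl⟩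
      have := List.mem_range.mp hk
      simp only [Int.ofNat_eq_natCast]
      omega
    have hne : splits ≠ [] := by
      simp only [splits]
      split <;> simp <;> omega
    match hpa : pickA n_pairs pos splits 0 with
    | (count, a) =>
      have hb : 0 ≤ a ∧ a < n_pairs := by
        have hm := pickA_mem n_pairs pos splits 0 hne
        rw [hpa] at hm
        exact hall a hm
      let num_B := numSol (n_pairs - a - 1)
      "(" ++ unrank a (PySem.Int.floordiv (pos - count) num_B) sorting_criterion
          ++ ")"
          ++ unrank (n_pairs - a - 1) (PySem.Int.mod (pos - count) num_B) sorting_criterion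
termination_by n_pairs.toNat
decreasing_by
  · omega
  · omega

-- ===== PORT B =====
-- Catalan table built once: cat = [1]; cat.append(sum(cat[k]*cat[m-1-k] for k in range(m))) for m = 1..n
def buildCat (n : Nat) : Array Int :=
  (List.range n).foldl
    (fun cat i =>
      let m := i + 1
      cat.push ((List.range m).foldl (fun s k => s + cat[k]! * cat[m - 1 - k]!) 0))
    #[1]

-- B's split-scan loop (same for-with-break written over Nat splits with table lookups)
def pickB (cat : Array Int) (n : Nat) (p : Int) : List Nat → Int → Int × Nat
  | [], count => (count, 0)   -- never reached from goB
  | a :: rest, count =>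
    let w := cat[a]! * cat[n - 1 - a]!
    if count + w > p then (count, a)
    else
      match rest with
      | [] => (count + w, a)
      | _ :: _ => pickB cat n p rest (count + w)

theorem pickB_mem (cat : Array Int) (n : Nat) (p : Int) (l : List Nat) (c : Int) (h : l ≠ []) :
    (pickB cat n p l c).2 ∈ l := by
  induction l generalizing c with
  | nil => exact absurd rfl h
  | cons a rest ih =>
    simp only [pickB]
    split
    · simp
    · cases rest with
      | nil => simp
      | cons b t =>
        have := ih (c + cat[a]! * cat[n - 1 - a]!) (by simp)
        exact List.mem_cons_of_mem a this

-- the inner recursive helper go(n, p); divmod ported as the floordiv/mod pair (exact: the divisor is never 0 in use)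
def goB (cat : Array Int) (sc : String) : Nat → Int → String
  | 0, _ => ""
  | n + 1, p =>
    let splits : List Nat :=
      if sc == "loves_closing_par" then List.range (n + 1) else (List.range (n + 1)).reverse
    have hall : ∀ x ∈ splits, x < n + 1 := by
      intro x hx
      have hx' : x ∈ List.range (n + 1) := by
        simp only [splits] at hx
        split at hx
        · exact hx
        · exact List.mem_reverse.mp hx
      exact List.mem_range.mp hx'
    have hne : splits ≠ [] := by
      simp only [splits]; split <;> simp
    match hpb : pickB cat (n + 1) p splits 0 with
    | (count, a) =>
      have ha : a < n + 1 := by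
        have hm := pickB_mem cat (n + 1) p splits 0 hne
        rw [hpb] at hm
        exact hall a hm
      let b := n + 1 - 1 - a
      let q := PySem.Int.floordiv (p - count) cat[b]!
      let r := PySem.Int.mod (p - count) cat[b]!
      "(" ++ goB cat sc a q ++ ")" ++ goB cat sc b r
termination_by n _ => n
decreasing_by
  · exact ha
  · omega

def unrank_alt (n_pairs : Int) (pos : Int) (sorting_criterion : String) : String :=
  if n_pairs ≤ 0 then ""
  else goB (buildCat n_pairs.toNat) sorting_criterion n_pairs.toNat pos

-- ===== PRECONDITION & SPEC =====
-- Pre_ excludes exactly n_pairs < 0, where A raises UnboundLocalError (its split loop never binds its variable).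
def Pre_unrank (n_pairs : Int) (pos : Int) (sorting_criterion : String) : Prop := 0 ≤ n_pairs
instance (n_pairs : Int) (pos : Int) (sorting_criterion : String) : Decidable (Pre_unrank n_pairs pos sorting_criterion) := by unfold Pre_unrank; infer_instance
def pvWitness_unrank : Int × Int × String := (3, 2, "loves_opening_par")

def Spec_unrank (n_pairs : Int) (pos : Int) (sorting_criterion : String) (out : String) : Prop := out = unrank_alt n_pairs pos sorting_criterion
instance (n_pairs : Int) (pos : Int) (sorting_criterion : String) (out : String) : Decidable (Spec_unrank n_pairs pos sorting_criterion out) := by unfold Spec_unrank; infer_instance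

-- ===== CLAIM (what is proved, stated in full; the proofs are below) =====
def Claim_equal_unrank : Prop := ∀ (n_pairs : Int) (pos : Int) (sorting_criterion : String), Dom_unrank n_pairs pos sorting_criterion → Pre_unrank n_pairs pos sorting_criterion → Spec_unrank n_pairs pos sorting_criterion (unrank n_pairs pos sorting_criterion)

-- ===== LEMMAS AND PROOFS =====

theorem getElem!_push_lt (a : Array Int) (x : Int) (k : Nat) (h : k < a.size) :
    (a.push x)[k]! = a[k]! := by
  rw [Array.getElem!_eq_getD, Array.getElem!_eq_getD]
  unfold Array.getD
  simp [Array.getElem_push, h, Nat.lt_succ_of_lt h]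

theorem getElem!_push_size (a : Array Int) (x : Int) : (a.push x)[a.size]! = x := by
  rw [Array.getElem!_eq_getD]; unfold Array.getD; simp

theorem numSolNat_succ (n : Nat) :
    numSolNat (n + 1)
      = (List.range (n + 1)).foldl (fun r k => r + numSolNat k * numSolNat (n - k)) 0 := by
  rw [numSolNat]
  rw [show (fun (r : Int) (k : {x // x ∈ List.range (n + 1)}) =>
        have hk : k.1 < n + 1 := List.mem_range.mp k.2
        r + numSolNat k.1 * numSolNat (n - k.1))
      = fun (r : Int) (k : {x // x ∈ List.range (n + 1)}) => r + numSolNat k.1 * numSolNat (n - k.1) from rfl]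
  exact List.foldl_attach (l := List.range (n + 1))
    (f := fun r k => r + numSolNat k * numSolNat (n - k)) (b := 0)

theorem buildCat_succ (n : Nat) :
    buildCat (n + 1)
      = (buildCat n).push
          ((List.range (n + 1)).foldl
            (fun s k => s + (buildCat n)[k]! * (buildCat n)[(n + 1) - 1 - k]!) 0) := by
  unfold buildCat
  rw [List.range_succ, List.foldl_append]
  simp only [List.foldl_cons, List.foldl_nil]
  rw [List.range_succ, List.foldl_append]

theorem buildCat_size (n : Nat) : (buildCat n).size = n + 1 := by
  induction n with
  | zero => rfl
  | succ m ih => rw [buildCat_succ, Array.size_push, ih]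

theorem buildCat_get (N : Nat) : ∀ k, k ≤ N → (buildCat N)[k]! = numSolNat k := by
  induction N with
  | zero =>
    intro k hk
    interval_cases k
    simp [numSolNat, buildCat]
  | succ M ih =>
    intro k hk
    rw [buildCat_succ]
    rcases Nat.lt_or_ge k (M + 1) with hlt | hge
    · rw [getElem!_push_lt _ _ _ (by rw [buildCat_size]; omega)]
      exact ih k (by omega)
    · have hkM : k = M + 1 := by omega
      subst hkM
      have hsz : (buildCat M).size = M + 1 := buildCat_size M
      rw [← hsz, getElem!_push_size, hsz]
      rw [numSolNat_succ]
      apply List.foldl_ext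
      intro s j hj
      have hjM : j ≤ M := by have := List.mem_range.mp hj; omega
      rw [ih j hjM, (by omega : M + 1 - 1 - j = M - j), ih (M - j) (by omega)]

theorem numSol_natCast (m : Nat) : numSol (m : Int) = numSolNat m := by
  unfold numSol
  rcases Nat.eq_zero_or_pos m with h | h
  · subst h; simp [numSolNat]
  · rw [if_neg (by omega), if_neg (by omega), Int.toNat_natCast]

theorem pick_corr (cat : Array Int) (N n : Nat) (hn : n ≤ N)
    (hcat : ∀ k, k ≤ N → cat[k]! = numSolNat k)
    (pos : Int) (l : List Nat) (hl : ∀ a ∈ l, a < n) (c : Int) :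
    pickA (n : Int) pos (l.map Int.ofNat) c
      = ((pickB cat n pos l c).1, ((pickB cat n pos l c).2 : Int)) := by
  induction l generalizing c with
  | nil => simp [pickA, pickB]
  | cons a t ih =>
    have ha : a < n := hl a (by simp)
    have hw : numSol (a : Int) * numSol ((n : Int) - (a : Int) - 1) = cat[a]! * cat[n - 1 - a]! := by
      rw [hcat a (by omega), hcat (n - 1 - a) (by omega)]
      rw [(by omega : (n : Int) - (a : Int) - 1 = ((n - 1 - a : Nat) : Int))]
      rw [numSol_natCast, numSol_natCast]
    simp only [List.map_cons, pickA, pickB, Int.ofNat_eq_natCast, hw]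
    split
    · rfl
    · cases t with
      | nil => rfl
      | cons b u =>
        simp only [List.map_cons]
        exact ih (fun x hx => hl x (List.mem_cons_of_mem a hx)) _

theorem unrank_pos_eq (n : Int) (hn : 0 < n) (pos : Int) (sc : String) :
    unrank n pos sc =
      (fun S => (fun ca =>
        (fun num_B =>
          "(" ++ unrank ca.2 (PySem.Int.floordiv (pos - ca.1) num_B) sc ++ ")"
              ++ unrank (n - ca.2 - 1) (PySem.Int.mod (pos - ca.1) num_B) sc)
        (numSol (n - ca.2 - 1)))
        (pickA n pos S 0))
      (if sc == "loves_closing_par"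
        then (List.range n.toNat).map Int.ofNat
        else ((List.range n.toNat).map Int.ofNat).reverse) := by
  rw [unrank, dif_neg (by omega)]
theorem goB_succ_eq (cat : Array Int) (sc : String) (m : Nat) (p : Int) :
    goB cat sc (m + 1) p =
      (fun S => (fun ca =>
        "(" ++ goB cat sc ca.2 (PySem.Int.floordiv (p - ca.1) cat[m + 1 - 1 - ca.2]!) ++ ")"
            ++ goB cat sc (m + 1 - 1 - ca.2) (PySem.Int.mod (p - ca.1) cat[m + 1 - 1 - ca.2]!))
        (pickB cat (m + 1) p S 0))
      (if sc == "loves_closing_par" then List.range (m + 1) else (List.range (m + 1)).reverse) := by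
  rw [goB]

theorem unrank_zero (pos : Int) (sc : String) : unrank 0 pos sc = "" := by
  rw [unrank]; norm_num

theorem main_corr (N : Nat) (n : Nat) (hn : n ≤ N) (pos : Int) (sc : String) :
    unrank (n : Int) pos sc = goB (buildCat N) sc n pos := by
  induction n using Nat.strong_induction_on generalizing pos with
  | _ n ih =>
    match n with
    | 0 => simp only [Nat.cast_zero]; rw [unrank_zero, goB]
    | m + 1 =>
      rw [unrank_pos_eq (↑(m + 1)) (by omega) pos sc, goB_succ_eq]
      set lN : List Nat := if sc == "loves_closing_par" then List.range (m + 1) else (List.range (m + 1)).reverse with hlN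
      have hl : ∀ a ∈ lN, a < m + 1 := by
        intro a ha
        rw [hlN] at ha
        split at ha
        · exact List.mem_range.mp ha
        · exact List.mem_range.mp (List.mem_reverse.mp ha)
      have hmap : (if sc == "loves_closing_par"
            then (List.range ((m + 1 : Nat) : Int).toNat).map Int.ofNat
            else ((List.range ((m + 1 : Nat) : Int).toNat).map Int.ofNat).reverse)
          = lN.map Int.ofNat := by
        rw [hlN, Int.toNat_natCast]
        split <;> simp
      rw [hmap]
      beta_reduce
      have hA := pick_corr (buildCat N) N (m + 1) (by omega) (fun k hk => buildCat_get N k hk) pos lN hl 0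
      rcases hB : pickB (buildCat N) (m + 1) pos lN 0 with ⟨cnt, a⟩
      rw [hB] at hA
      rw [hA]
      dsimp only
      have ha : a < m + 1 := hl _ (by
        have := pickB_mem (buildCat N) (m + 1) pos lN 0 (by
          rw [hlN]; split <;> simp)
        rw [hB] at this; exact this)
      have hnum : numSol ((m + 1 : Nat) - (a : Int) - 1) = (buildCat N)[m + 1 - 1 - a]! := by
        rw [(by omega : ((m + 1 : Nat) : Int) - (a : Int) - 1 = ((m + 1 - 1 - a : Nat) : Int))]
        rw [numSol_natCast, buildCat_get N _ (by omega)]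
      rw [hnum]
      have h1 := ih a (by omega) (by omega) (PySem.Int.floordiv (pos - cnt) (buildCat N)[m + 1 - 1 - a]!)
      have h2 := ih (m + 1 - 1 - a) (by omega) (by omega) (PySem.Int.mod (pos - cnt) (buildCat N)[m + 1 - 1 - a]!)
      rw [(by omega : ((m + 1 : Nat) : Int) - (a : Int) - 1 = ((m + 1 - 1 - a : Nat) : Int))]
      rw [h1, h2]

-- ===== VERDICT (by name: the statement is the Claim_ definition above) =====
theorem unrank_spec : Claim_equal_unrank := by
  intro n pos sc _ hpre
  unfold Spec_unrank unrank_alt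
  by_cases h : n ≤ 0
  · have h0 : n = 0 := le_antisymm h hpre
    subst h0
    rw [if_pos le_rfl, unrank_zero]
  · rw [if_neg h]
    rw [show n = ((n.toNat : Nat) : Int) from by omega]
    simp only [Int.toNat_natCast]
    exact main_corr n.toNat n.toNat le_rfl pos sc
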